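-- pv_equiv track=rewrite | github.com/tymyrddin/scripts-modern-ciphers | rsa/rsa_cipher.py | get_blocks_from_text
-- ===== SOURCE A (Python) =====
-- DEFAULT_BLOCK_SIZE = 128  # 128 bytes
--
-- BYTE_SIZE = 256  # One byte has 256 different values.
--
-- def get_blocks_from_text(message, blocksize=DEFAULT_BLOCK_SIZE):
--     # Converts a string message to a list of block integers. Each integer
--     # represents 128 (or whatever blocksize is set to) string characters.
--
--     message_bytes = message.encode("ascii")  # convert the string to bytes
--
--     block_ints = []
--     for block_start in range(0, len(message_bytes), blocksize):
--         # Calculate the block integer for this block of text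
--         block_int = 0
--         for i in range(block_start, min(block_start + blocksize, len(message_bytes))):
--             block_int += message_bytes[i] * (BYTE_SIZE ** (i % blocksize))
--         block_ints.append(block_int)
--     return block_ints
-- ===== SOURCE B (Python) =====
-- DEFAULT_BLOCK_SIZE = 128  # 128 bytes
--
-- BYTE_SIZE = 256  # One byte has 256 different values.
--
-- def get_blocks_from_text(message, blocksize=DEFAULT_BLOCK_SIZE):
--     # Slice the byte string into blocksize-sized chunks and let the standard
--     # library decode each chunk as a little-endian integer: int.from_bytes is
--     # exactly sum(chunk[j] * 256**j), with no index arithmetic or powers.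
--     message_bytes = message.encode("ascii")
--     return [int.from_bytes(message_bytes[k:k + blocksize], "little")
--             for k in range(0, len(message_bytes), blocksize)]
-- ===== Notes on version B (the rewrite author's own statement) =====
-- stated objective: faster
-- what changed: B slices the byte string into blocksize chunks and converts each chunk with int.from_bytes(chunk, 'little'), replacing A's per-byte loop that multiplies each byte by a freshly computed big-int power 256**(i % blocksize) and adds it into the block sum.
import Mathlib
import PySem

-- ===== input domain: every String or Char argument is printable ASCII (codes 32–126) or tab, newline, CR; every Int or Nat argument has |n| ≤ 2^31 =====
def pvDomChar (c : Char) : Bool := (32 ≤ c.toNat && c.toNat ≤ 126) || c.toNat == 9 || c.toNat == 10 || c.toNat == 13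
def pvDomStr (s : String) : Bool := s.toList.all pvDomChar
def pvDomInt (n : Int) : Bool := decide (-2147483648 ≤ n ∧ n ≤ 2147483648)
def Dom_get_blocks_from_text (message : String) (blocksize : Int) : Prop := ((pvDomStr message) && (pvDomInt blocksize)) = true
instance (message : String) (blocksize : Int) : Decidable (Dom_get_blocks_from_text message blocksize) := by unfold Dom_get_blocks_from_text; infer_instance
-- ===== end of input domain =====

-- B slices the byte list into blocksize chunks and decodes each chunk as a
-- little-endian integer (int.from_bytes), replacing A's per-byte power
-- 256**(i % blocksize); objective: faster (intended as faster; one timing run measured it so, another was voided by sandbox noise).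


-- ===== PORT A =====
-- message.encode("ascii") is exact on Dom (all char codes ≤ 126): the byte list is the list of char codes.
def get_blocks_from_text (message : String) (blocksize : Int) : List Int :=
  let message_bytes : List Int := message.toList.map (fun c => (c.toNat : Int))
  (PySem.List.pyRange 0 (message_bytes.length : Int) blocksize).foldl
    (fun block_ints block_start =>
      let block_int : Int :=
        (PySem.List.pyRange block_start (min (block_start + blocksize) (message_bytes.length : Int)) 1).foldl
          (fun bi i => bi + (PySem.List.pyGetD message_bytes i 0) * (256 ^ (PySem.Int.mod i blocksize).toNat)) 0
      block_ints ++ [block_int]) []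

-- ===== PORT B =====
-- int.from_bytes(chunk, "little") : Σ chunk[j]·256^j, written as the standard right fold.
def pvFromLE (l : List Int) : Int := l.foldr (fun x acc => x + 256 * acc) 0

def get_blocks_from_text_alt (message : String) (blocksize : Int) : List Int :=
  let message_bytes : List Int := message.toList.map (fun c => (c.toNat : Int))
  (PySem.List.pyRange 0 (message_bytes.length : Int) blocksize).map
    (fun k => pvFromLE (PySem.List.slice message_bytes (some k) (some (k + blocksize))))

-- ===== PRECONDITION & SPEC =====
-- Pre_ excludes only blocksize = 0, on which Python's range(0, len, 0) raises ValueError (in both A and B).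
def Pre_get_blocks_from_text (message : String) (blocksize : Int) : Prop := blocksize ≠ 0
instance (message : String) (blocksize : Int) : Decidable (Pre_get_blocks_from_text message blocksize) := by unfold Pre_get_blocks_from_text; infer_instance
def pvWitness_get_blocks_from_text : String × Int := ("abc", 2)

def Spec_get_blocks_from_text (message : String) (blocksize : Int) (out : List Int) : Prop := out = get_blocks_from_text_alt message blocksize
instance (message : String) (blocksize : Int) (out : List Int) : Decidable (Spec_get_blocks_from_text message blocksize out) := by unfold Spec_get_blocks_from_text; infer_instance

-- ===== CLAIM (what is proved, stated in full; the proofs are below) =====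
def Claim_equal_get_blocks_from_text : Prop := ∀ (message : String) (blocksize : Int), Dom_get_blocks_from_text message blocksize → Pre_get_blocks_from_text message blocksize → Spec_get_blocks_from_text message blocksize (get_blocks_from_text message blocksize)

-- ===== LEMMAS AND PROOFS =====

-- i % b = i - s when s is the aligned block start containing i.
theorem pv_mod_block (b s i : Int) (hb : 0 < b) (hdvd : b ∣ s) (h1 : s ≤ i) (h2 : i < s + b) :
    PySem.Int.mod i b = i - s := by
  rw [PySem.Int.mod_eq_emod_of_pos hb]
  obtain ⟨q, rfl⟩ := hdvd
  have h4 : i % b = (i - b * q) % b := by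
    conv_lhs => rw [show i = (i - b * q) + b * q by ring]
    rw [Int.add_mul_emod_self_left]
  rw [h4, Int.emod_eq_of_lt (by omega) (by omega)]

-- appending a byte to a little-endian chunk adds it at the top weight
theorem pv_fromLE_append (l : List Int) (x : Int) :
    pvFromLE (l ++ [x]) = pvFromLE l + x * 256 ^ l.length := by
  induction l with
  | nil => simp [pvFromLE]
  | cons y l ih =>
      simp only [pvFromLE, List.foldr_cons, List.cons_append, List.length_cons] at *
      rw [ih]; ring

-- A's positional-weight sum over [s, s+m) equals the little-endian value of the mapped chunk.
theorem pv_sum_eq_fromLE (g : Int → Int) (s : Int) : ∀ (m : Nat),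
    (PySem.List.pyRange s (s + m) 1).foldl (fun bi i => bi + g i * 256 ^ ((i - s).toNat)) 0
    = pvFromLE ((PySem.List.pyRange s (s + m) 1).map g) := by
  intro m
  induction m with
  | zero => simp [PySem.List.pyRange_one_eq_nil (le_refl s), pvFromLE]
  | succ m ih =>
      have hsplit : PySem.List.pyRange s (s + (m + 1 : Nat)) 1
          = PySem.List.pyRange s (s + m) 1 ++ [s + m] := by
        have : (s + (m + 1 : Nat) : Int) = (s + m) + 1 := by push_cast; ring
        rw [this, PySem.List.pyRange_one_succ_right (by omega)]
      rw [hsplit, List.foldl_append, List.map_append]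
      simp only [List.foldl_cons, List.foldl_nil, List.map_cons, List.map_nil]
      rw [pv_fromLE_append, ← ih]
      have hl : ((PySem.List.pyRange s (s + m) 1).map g).length = m := by
        rw [List.length_map, PySem.List.length_pyRange_one]; omega
      have ht : ((s + (m : Int)) - s).toNat = m := by omega
      rw [hl, ht]

-- the Python slice data[s : s+b] is exactly the mapped index range [s, min(s+b, n))
theorem pv_slice_eq_map (data : List Int) (s b : Int) (hs : 0 ≤ s) (hb : 0 < b)
    (hsn : s ≤ (data.length : Int)) :
    PySem.List.slice data (some s) (some (s + b))
    = (PySem.List.pyRange s (min (s + b) (data.length : Int)) 1).map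
        (fun i => PySem.List.pyGetD data i 0) := by
  rw [PySem.List.slice_toNat data hs (by omega)]
  apply List.ext_getElem
  · rw [List.length_take, List.length_drop, List.length_map, PySem.List.length_pyRange_one]
    omega
  · intro j h1 h2
    rw [List.getElem_take, List.getElem_drop, List.getElem_map, PySem.List.getElem_pyRange_one]
    have hj : (j : Int) < min (s + b) (data.length : Int) - s := by
      rw [List.length_map, PySem.List.length_pyRange_one] at h2; omega
    rw [PySem.List.pyGetD_eq_getElem data 0 (by omega) (by omega)]
    congr 1
    omega

-- negative step, start 0, nonnegative stop: empty range
theorem pv_pyRange_neg_nil (n b : Int) (hn : 0 ≤ n) (hb : b < 0) :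
    PySem.List.pyRange 0 n b = [] := by
  unfold PySem.List.pyRange
  simp only [if_neg (by omega : ¬ b = 0)]
  rw [if_neg (by omega : ¬ 0 < b), if_neg (by omega : ¬ n < 0)]
  simp

-- main equality over the byte list
theorem pv_main (mb : List Int) (b : Int) (hpre : b ≠ 0) :
    (PySem.List.pyRange 0 (mb.length : Int) b).foldl
      (fun block_ints block_start =>
        block_ints ++ [(PySem.List.pyRange block_start (min (block_start + b) (mb.length : Int)) 1).foldl
          (fun bi i => bi + (PySem.List.pyGetD mb i 0) * (256 ^ (PySem.Int.mod i b).toNat)) 0]) []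
    = (PySem.List.pyRange 0 (mb.length : Int) b).map
        (fun k => pvFromLE (PySem.List.slice mb (some k) (some (k + b)))) := by
  set n : Int := (mb.length : Int) with hn
  have hn0 : 0 ≤ n := by positivity
  rcases lt_or_gt_of_ne hpre with hneg | hpos
  · rw [pv_pyRange_neg_nil n b hn0 hneg]
    rfl
  · rw [PySem.List.foldl_append_singleton_eq_map]
    simp only [List.nil_append]
    apply List.map_congr_left
    intro s hs
    rw [PySem.List.mem_pyRange_iff_of_pos hpos] at hs
    obtain ⟨hs0, hsn, hdvd⟩ := hs
    have hdvd' : b ∣ s := by simpa using hdvd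
    set e : Int := min (s + b) n with he
    have hA : (PySem.List.pyRange s e 1).foldl
        (fun bi i => bi + (PySem.List.pyGetD mb i 0) * (256 ^ (PySem.Int.mod i b).toNat)) 0
        = (PySem.List.pyRange s e 1).foldl
        (fun bi i => bi + (PySem.List.pyGetD mb i 0) * (256 ^ ((i - s).toNat))) 0 := by
      apply PySem.List.foldl_congr_mem
      intro acc i hi
      rw [PySem.List.mem_pyRange_one] at hi
      rw [pv_mod_block b s i hpos hdvd' hi.1 (by omega)]
    have hm : e = s + ((e - s).toNat : Int) := by omega
    have hB := pv_sum_eq_fromLE (fun i => PySem.List.pyGetD mb i 0) s (e - s).toNat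
    rw [← hm] at hB
    rw [hA, hB, ← pv_slice_eq_map mb s b (by omega) hpos (by omega)]

-- ===== VERDICT (by name: the statement is the Claim_ definition above) =====
theorem get_blocks_from_text_spec : Claim_equal_get_blocks_from_text := by
  unfold Claim_equal_get_blocks_from_text
  intro message blocksize _ hpre
  show get_blocks_from_text message blocksize = get_blocks_from_text_alt message blocksize
  simp only [get_blocks_from_text, get_blocks_from_text_alt]
  apply pv_main _ blocksize hpre
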